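-- pv_equiv track=rewrite | github.com/trustpizza/advent_of_code | day_05/main.py | get_data_shape
-- ===== SOURCE A (Python) =====
-- def get_data_shape(container_data):
--     data_shape = []
--     col_nums = container_data[-1]
--     for i, num in enumerate(col_nums):
--         if num != " ":
--             col = []
--             for line in container_data[:-1]:
--                 if line[i] != " ":
--                     col.append(line[i])
--             data_shape.append(col)
--     return data_shape
-- ===== SOURCE B (Python) =====
-- def get_data_shape(container_data):
--     buckets = {}
--     for line in container_data[:-1]:
--         for i, ch in enumerate(line):
--             if ch != " ":
--                 buckets.setdefault(i, []).append(ch)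
--     return [buckets.get(i, []) for i, c in enumerate(container_data[-1]) if c != " "]
-- ===== Notes on version B (the rewrite author's own statement) =====
-- stated objective: alternative
-- what changed: Instead of rescanning the whole body once per selected header column, B makes one pass over the body grouping every non-space character into a dict of buckets keyed by its column position, and finally reads off the buckets at the header's selected positions.
import Mathlib
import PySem

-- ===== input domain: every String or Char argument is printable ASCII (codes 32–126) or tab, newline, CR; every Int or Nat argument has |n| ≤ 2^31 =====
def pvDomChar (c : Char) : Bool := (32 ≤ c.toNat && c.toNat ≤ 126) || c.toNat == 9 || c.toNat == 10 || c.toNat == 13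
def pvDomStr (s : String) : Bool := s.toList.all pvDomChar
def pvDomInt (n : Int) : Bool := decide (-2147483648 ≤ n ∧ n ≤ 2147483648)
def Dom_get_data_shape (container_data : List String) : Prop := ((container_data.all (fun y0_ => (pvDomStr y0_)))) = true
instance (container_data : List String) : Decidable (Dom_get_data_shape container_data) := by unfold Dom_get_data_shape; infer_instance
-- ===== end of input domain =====

-- B replaces A's per-selected-column rescans of the body by one pass that groups every
-- non-space character into a dict of buckets keyed by column position, then reads the
-- buckets at the header's selected positions (alternative decomposition, same cost).

-- ===== PORT A =====
def get_data_shape (container_data : List String) : List (List String) :=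
  let col_nums := ((PySem.List.pyGet? container_data (-1)).getD "").toList
  (PySem.List.enumerate col_nums 0).foldl (fun data_shape p =>
    if p.2 ≠ ' ' then
      let col := (PySem.List.slice container_data none (some (-1))).foldl (fun col line =>
        match PySem.Str.pyGet? line p.1 with   -- none = IndexError, excluded by Pre_
        | some c => if c ≠ ' ' then col ++ [String.singleton c] else col
        | none => col) []
      data_shape ++ [col]
    else data_shape) []

-- ===== PORT B =====
def get_data_shape_alt (container_data : List String) : List (List String) :=
  let buckets : PySem.Dict Int (List String) :=
    (PySem.List.slice container_data none (some (-1))).foldl (fun b line =>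
      (PySem.List.enumerate line.toList 0).foldl (fun b p =>
        if p.2 ≠ ' ' then b.modify p.1 [] (· ++ [String.singleton p.2]) else b) b)
      PySem.Dict.empty
  let last := ((PySem.List.pyGet? container_data (-1)).getD "").toList
  (PySem.List.enumerate last 0).filterMap (fun p =>
    if p.2 ≠ ' ' then some (buckets.getD p.1 []) else none)

-- ===== PRECONDITION & SPEC =====
-- Pre_ excludes exactly the inputs where Python A raises: the empty list (container_data[-1]
-- is an IndexError) and ragged inputs where some selected header index is out of range of a
-- body line (line[i] is an IndexError).
def Pre_get_data_shape (container_data : List String) : Prop :=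
  container_data ≠ [] ∧
  ∀ i : Nat, i < (container_data.getLast?.getD "").toList.length →
    (container_data.getLast?.getD "").toList.getD i ' ' ≠ ' ' →
    ∀ line ∈ container_data.dropLast, i < line.toList.length
instance (container_data : List String) : Decidable (Pre_get_data_shape container_data) := by
  unfold Pre_get_data_shape; infer_instance

def pvWitness_get_data_shape : List String := ["ab", "12"]

def Spec_get_data_shape (container_data : List String) (out : List (List String)) : Prop := out = get_data_shape_alt container_data
instance (container_data : List String) (out : List (List String)) : Decidable (Spec_get_data_shape container_data out) := by unfold Spec_get_data_shape; infer_instance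

-- ===== CLAIM (what is proved, stated in full; the proofs are below) =====
def Claim_equal_get_data_shape : Prop := ∀ (container_data : List String), Dom_get_data_shape container_data → Pre_get_data_shape container_data → Spec_get_data_shape container_data (get_data_shape container_data)

-- ===== LEMMAS AND PROOFS =====

-- A's per-line contribution to the column at index i.
def pvStepVal (line : String) (i : Int) : List String :=
  match PySem.Str.pyGet? line i with
  | some c => if c ≠ ' ' then [String.singleton c] else []
  | none => []

-- A's inner loop for one selected column.
def pvColA (lines : List String) (i : Int) : List String :=
  lines.foldl (fun col line =>
    match PySem.Str.pyGet? line i with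
    | some c => if c ≠ ' ' then col ++ [String.singleton c] else col
    | none => col) []

theorem pvColA_eq_flatMap (lines : List String) (i : Int) :
    pvColA lines i = lines.flatMap (fun line => pvStepVal line i) := by
  unfold pvColA
  have h : (fun (col : List String) (line : String) =>
      match PySem.Str.pyGet? line i with
      | some c => if c ≠ ' ' then col ++ [String.singleton c] else col
      | none => col) = fun col line => col ++ pvStepVal line i := by
    funext col line
    unfold pvStepVal
    cases PySem.Str.pyGet? line i with
    | none => simp
    | some c => by_cases hc : c = ' ' <;> simp [hc]
  rw [h, PySem.List.foldl_append_eq_flatMap]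
  simp

-- keys below the enumeration start never occur
theorem pvFilter_enum_lt (l : List Char) :
    ∀ (m j : Int), j < m →
      (((PySem.List.enumerate l m).filter (fun p => decide (p.2 ≠ ' '))).filter
        (fun p => p.1 == j)) = [] := by
  induction l with
  | nil => intro m j hj; simp [PySem.List.enumerate_nil]
  | cons c cs ih =>
    intro m j hj
    simp only [PySem.List.enumerate_cons, List.filter_cons]
    by_cases hc : c = ' '
    · simpa [hc] using ih (m + 1) j (by omega)
    · have hne : ((m : Int) == j) = false := by simp; omega
      simpa [hc, hne] using ih (m + 1) j (by omega)

-- the filtered enumeration of one line at key k+n is exactly A's per-line contribution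
theorem pvContrib (l : List Char) :
    ∀ (k n : Nat),
      ((((PySem.List.enumerate l (k : Int)).filter (fun p => decide (p.2 ≠ ' '))).filter
          (fun p => p.1 == ((k + n : Nat) : Int))).map (fun p => String.singleton p.2)) =
        (match l[n]? with
          | some c => if c ≠ ' ' then [String.singleton c] else []
          | none => []) := by
  induction l with
  | nil => intro k n; simp [PySem.List.enumerate_nil]
  | cons c cs ih =>
    intro k n
    cases n with
    | zero =>
      simp only [PySem.List.enumerate_cons, List.filter_cons]
      have htail := pvFilter_enum_lt cs ((k : Int) + 1) ((k + 0 : Nat) : Int) (by push_cast; omega)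
      by_cases hc : c = ' '
      · simpa [hc] using congrArg (List.map (fun p : Int × Char => String.singleton p.2)) htail
      · have hk : ((k : Int) == ((k + 0 : Nat) : Int)) = true := by simp
        simp only [hc, decide_not]
        simp [hc]
        intro a b hmem hak
        by_contra hb
        have h1 : (a, b) ∈ List.filter (fun p : Int × Char => decide (p.2 ≠ ' '))
            (PySem.List.enumerate cs ((k : Int) + 1)) :=
          List.mem_filter.mpr ⟨hmem, by simpa using hb⟩
        have h2 := List.filter_eq_nil_iff.mp htail _ h1
        simp at h2
        omega
    | succ n' =>
      have hne : ((k : Int) == ((k + (n' + 1) : Nat) : Int)) = false := by simp; omega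
      have hih := ih (k + 1) n'
      have hcast : (((k + 1) + n' : Nat) : Int) = ((k + (n' + 1) : Nat) : Int) := by push_cast; ring
      rw [hcast] at hih
      have hstep : ((((PySem.List.enumerate (c :: cs) (k : Int)).filter
            (fun p => decide (p.2 ≠ ' '))).filter
            (fun p => p.1 == ((k + (n' + 1) : Nat) : Int)))) =
          (((PySem.List.enumerate cs (((k + 1 : Nat)) : Int)).filter
            (fun p => decide (p.2 ≠ ' '))).filter
            (fun p => p.1 == ((k + (n' + 1) : Nat) : Int))) := by
        have hcast2 : (((k : Nat) : Int) + 1) = (((k + 1 : Nat)) : Int) := by push_cast; ring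
        have hne' : (((k : Nat) : Int) == ((k : Nat) : Int) + (((n' : Nat) : Int) + 1)) = false := by
          simp; omega
        simp only [PySem.List.enumerate_cons, List.filter_cons, hcast2]
        by_cases hc : c = ' ' <;>
          simp [hc, hne', List.filter_filter, Bool.and_comm]
      rw [hstep, hih]
      simp

-- one line of B's grouping pass, read at any key
theorem pvGetD_inner (b : PySem.Dict Int (List String)) (l : List Char) (i : Int) :
    (((PySem.List.enumerate l (0 : Int)).foldl (fun b p =>
        if p.2 ≠ ' ' then b.modify p.1 [] (· ++ [String.singleton p.2]) else b) b)).getD i [] =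
      b.getD i [] ++
        ((((PySem.List.enumerate l (0 : Int)).filter (fun p => decide (p.2 ≠ ' '))).filter
            (fun p => p.1 == i)).map (fun p => String.singleton p.2)) := by
  have hfun : (fun (b : PySem.Dict Int (List String)) (p : Int × Char) =>
      if p.2 ≠ ' ' then b.modify p.1 [] (· ++ [String.singleton p.2]) else b) =
      (fun b p => if (fun (q : Int × Char) => decide (q.2 ≠ ' ')) p then
        b.modify p.1 [] (· ++ [String.singleton p.2]) else b) := by
    funext b p
    by_cases hc : p.2 = ' ' <;> simp [hc]
  rw [hfun, ← List.foldl_filter]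
  have hmap : ((PySem.List.enumerate l (0 : Int)).filter (fun p => decide (p.2 ≠ ' '))).foldl
      (fun (b : PySem.Dict Int (List String)) (p : Int × Char) =>
        b.modify p.1 [] (· ++ [String.singleton p.2])) b =
      (((PySem.List.enumerate l (0 : Int)).filter (fun p => decide (p.2 ≠ ' '))).map
        (fun p : Int × Char => (p.1, String.singleton p.2))).foldl
      (fun (b : PySem.Dict Int (List String)) (q : Int × String) =>
        b.modify q.1 [] (· ++ [q.2])) b := by
    rw [List.foldl_map]
  rw [hmap, PySem.Dict.getD_foldl_modify_append]
  simp [List.filter_map, List.map_map, Function.comp_def]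

-- B's whole grouping pass, read at a natural key, equals A's column
theorem pvGetD_buckets (lines : List String) :
    ∀ (b : PySem.Dict Int (List String)) (n : Nat),
      ((lines.foldl (fun b line =>
          (PySem.List.enumerate line.toList 0).foldl (fun b p =>
            if p.2 ≠ ' ' then b.modify p.1 [] (· ++ [String.singleton p.2]) else b) b) b)).getD (n : Int) [] =
        b.getD (n : Int) [] ++ lines.flatMap (fun line => pvStepVal line (n : Int)) := by
  induction lines with
  | nil => intro b n; simp
  | cons line rest ih =>
    intro b n
    simp only [List.foldl_cons, List.flatMap_cons]
    rw [ih, pvGetD_inner]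
    have hc := pvContrib line.toList 0 n
    simp only [Nat.cast_zero, Nat.zero_add] at hc
    rw [hc]
    simp [pvStepVal, List.append_assoc]

-- list comprehension with a filter: filterMap of an if = map after filter
theorem pvFilterMap_if {α β : Type} (p : α → Bool) (f : α → β) (l : List α) :
    l.filterMap (fun x => if p x then some (f x) else none) = (l.filter p).map f := by
  induction l with
  | nil => rfl
  | cons x xs ih => by_cases h : p x <;> simp [h, ih]

theorem pvEnum_fst_nonneg {α : Type} {l : List α} {p : Int × α}
    (h : p ∈ PySem.List.enumerate l (0 : Int)) : 0 ≤ p.1 := by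
  have hm : p.1 ∈ (PySem.List.enumerate l (0 : Int)).map (·.1) := List.mem_map_of_mem h
  rw [PySem.List.map_fst_enumerate] at hm
  have := (PySem.List.mem_pyRange_one.mp hm).1
  omega

-- ===== VERDICT (by name: the statement is the Claim_ definition above) =====
theorem get_data_shape_spec : Claim_equal_get_data_shape := by
  intro cd _ _
  unfold Spec_get_data_shape get_data_shape get_data_shape_alt
  simp only
  rw [show (fun (data_shape : List (List String)) (p : Int × Char) =>
      if p.2 ≠ ' ' then data_shape ++
        [(PySem.List.slice cd none (some (-1))).foldl (fun col line =>
          match PySem.Str.pyGet? line p.1 with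
          | some c => if c ≠ ' ' then col ++ [String.singleton c] else col
          | none => col) []]
      else data_shape) =
      (fun ds p => if (fun (q : Int × Char) => decide (q.2 ≠ ' ')) p then
        ds ++ [(fun (q : Int × Char) => pvColA (PySem.List.slice cd none (some (-1))) q.1) p]
        else ds) from by
    funext ds p
    by_cases hc : p.2 = ' ' <;> simp [hc, pvColA]]
  rw [PySem.List.foldl_append_if]
  rw [show (fun (p : Int × Char) =>
      if p.2 ≠ ' ' then some ((((PySem.List.slice cd none (some (-1))).foldl (fun b line =>
        (PySem.List.enumerate line.toList 0).foldl (fun b p =>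
          if p.2 ≠ ' ' then b.modify p.1 [] (· ++ [String.singleton p.2]) else b) b)
        PySem.Dict.empty)).getD p.1 []) else none) =
      (fun p => if (fun (q : Int × Char) => decide (q.2 ≠ ' ')) p then
        some ((fun (q : Int × Char) => (((PySem.List.slice cd none (some (-1))).foldl (fun b line =>
          (PySem.List.enumerate line.toList 0).foldl (fun b p =>
            if p.2 ≠ ' ' then b.modify p.1 [] (· ++ [String.singleton p.2]) else b) b)
          PySem.Dict.empty)).getD q.1 []) p) else none) from by
    funext p
    by_cases hc : p.2 = ' ' <;> simp [hc]]
  rw [pvFilterMap_if]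
  rw [List.nil_append]
  apply List.map_congr_left
  intro p hp
  have h0 : 0 ≤ p.1 := pvEnum_fst_nonneg (List.mem_of_mem_filter hp)
  have hn : p.1 = ((p.1.toNat : Nat) : Int) := by omega
  rw [hn, pvColA_eq_flatMap, pvGetD_buckets]
  simp
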